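/- GENERATED by c/gen_decode.py: decode facts of the image, one per distinct instruction byte string. -/
import UserX.DecodeImage

#decode_all Vorbis.Dec
  "0f28c3"  -- movaps xmm0,xmm3
  "0f843d010000"  -- je 111b2a
  "0f84ea010000"  -- je 10729c
  "0f8820010000"  -- js 10f12a
  "0f8f0f070000"  -- jg 116784
  "0fb6842cc0000000"  -- movzx eax,BYTE PTR [rsp+rbp*1+0xc0]
  "395d04"  -- cmp DWORD PTR [rbp+0x4],ebx
  "410faffd"  -- imul edi,r13d
  "4139ec"  -- cmp r12d,ebp
  "41884702"  -- mov BYTE PTR [r15+0x2],al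
  "418b4604"  -- mov eax,DWORD PTR [r14+0x4]
  "41c7042400000000"  -- mov DWORD PTR [r12],0x0
  "42c744bc5000000000"  -- mov DWORD PTR [rsp+r15*4+0x50],0x0
  "4439a540080000"  -- cmp DWORD PTR [rbp+0x840],r12d
  "44896c2478"  -- mov DWORD PTR [rsp+0x78],r13d
  "4489ee"  -- mov esi,r13d
  "448ba3d8060000"  -- mov r12d,DWORD PTR [rbx+0x6d8]
  "4529f5"  -- sub r13d,r14d
  "458b2424"  -- mov r12d,DWORD PTR [r12]
  "4801df"  -- add rdi,rbx
  "48635c2424"  -- movsxd rbx,DWORD PTR [rsp+0x24]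
  "4881fdffffff1f"  -- cmp rbp,0x1fffffff
  "48891424"  -- mov QWORD PTR [rsp],rdx
  "4889d7"  -- mov rdi,rdx
  "488b7328"  -- mov rsi,QWORD PTR [rbx+0x28]
  "488d1c82"  -- lea rbx,[rdx+rax*4]
  "488d7b18"  -- lea rdi,[rbx+0x18]
  "488d7f70"  -- lea rdi,[rdi+0x70]
  "488dbbec060000"  -- lea rdi,[rbx+0x6ec]
  "4898"  -- cdqe
  "48c7842490000000000b1100"  -- mov QWORD PTR [rsp+0x90],0x110b00
  "4963dd"  -- movsxd rbx,r13d
  "4989f7"  -- mov r15,rsi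
  "498d7d04"  -- lea rdi,[r13+0x4]
  "498dbfa8000000"  -- lea rdi,[r15+0xa8]
  "4a8dbca400070000"  -- lea rdi,[rsp+r12*4+0x700]
  "4c63642438"  -- movsxd r12,DWORD PTR [rsp+0x38]
  "4c89e3"  -- mov rbx,r12
  "4c8bb538ffffff"  -- mov r14,QWORD PTR [rbp-0xc8]
  "4c8dbd9c000000"  -- lea r15,[rbp+0x9c]
  "4d8d3c56"  -- lea r15,[r14+rdx*2]
  "660f2ee0"  -- ucomisd xmm4,xmm0
  "66410f6efd"  -- movd xmm7,r13d
  "6689442430"  -- mov WORD PTR [rsp+0x30],ax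
  "7428"  -- je 116396
  "7516"  -- jne 10d213
  "7819"  -- js 10c8ee
  "7e26"  -- jle 10413c
  "807b1001"  -- cmp BYTE PTR [rbx+0x10],0x1
  "83bd60ffffff07"  -- cmp DWORD PTR [rbp-0xa0],0x7
  "890b"  -- mov DWORD PTR [rbx],ecx
  "8981f8060000"  -- mov DWORD PTR [rcx+0x6f8],eax
  "89fa"  -- mov edx,edi
  "8b6b04"  -- mov ebp,DWORD PTR [rbx+0x4]
  "8b9d48ffffff"  -- mov ebx,DWORD PTR [rbp-0xb8]
  "ba01000000"  -- mov edx,0x1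
  "c1fb04"  -- sar ebx,0x4
  "c7830400c00004f204f2"  -- mov DWORD PTR [rbx+0xc00004],0xf204f204
  "e800f9feff"  -- call 100800
  "e80ab8feff"  -- call 1008e0
  "e8153affff"  -- call 100720
  "e81dcafeff"  -- call 100720
  "e828bdfeff"  -- call 100640
  "e830e3ffff"  -- call 10d440
  "e83b8fffff"  -- call 100640
  "e84717ffff"  -- call 100800
  "e851a5feff"  -- call 100800
  "e85ca5feff"  -- call 100640
  "e86a10ffff"  -- call 104c60
  "e8759efeff"  -- call 100640
  "e87feffeff"  -- call 103d00
  "e88baeffff"  -- call 100640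
  "e894f3ffff"  -- call 101d00
  "e89f79ffff"  -- call 103d00
  "e8a9f6ffff"  -- call 100200
  "e8b314ffff"  -- call 100300
  "e8bdbdffff"  -- call 10d1c0
  "e8c876ffff"  -- call 100800
  "e8d152ffff"  -- call 100800
  "e8dba5feff"  -- call 100640
  "e8e538ffff"  -- call 100640
  "e8edbdfeff"  -- call 100640
  "e8f872ffff"  -- call 100720
  "e910ffffff"  -- jmp 10f549
  "e95effffff"  -- jmp 10b21d
  "e9abfeffff"  -- jmp 10297f
  "e9fc000000"  -- jmp 11501f
  "eb94"  -- jmp 101321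
  "ebed"  -- jmp 1133c3
  "f20f58d2"  -- addsd xmm2,xmm2
  "f20f5e1d90e10100"  -- divsd xmm3,QWORD PTR [rip+0x1e190]
  "f30f1055a8"  -- movss xmm2,DWORD PTR [rbp-0x58]
  "f30f107c240c"  -- movss xmm7,DWORD PTR [rsp+0xc]
  "f30f11542424"  -- movss DWORD PTR [rsp+0x24],xmm2
  "f30f117c2418"  -- movss DWORD PTR [rsp+0x18],xmm7
  "f30f58fe"  -- addss xmm7,xmm6
  "f30f5c43f4"  -- subss xmm0,DWORD PTR [rbx-0xc]
  "f3410f104d08"  -- movss xmm1,DWORD PTR [r13+0x8]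
  "f3440f5cc1"  -- subss xmm8,xmm1
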